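-- pv_equiv track=rewrite | github.com/xremming/rulesraker | rulesraker/parse.py | separate_parts_and_glossary
-- ===== SOURCE A (Python) =====
-- from enum import Enum
-- from typing import Iterable, List, Literal, Optional, Tuple, Union
--
-- class State(Enum):
--     start = 0
--     rules = 1
--     glossary = 2
--     end = 3
--
-- def separate_parts_and_glossary(vs: List[str]) -> Tuple[List[str], List[str]]:
--     parts = []
--     glossary = []
--
--     state = State.start
--     for part in vs:
--         part = part.strip()
--         if state == State.start and part == "Credits":
--             state = State.rules
--             continue
--         if state == State.rules and part == "Glossary":
--             state = State.glossary
--             continue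
--         if state == State.glossary and part == "Credits":
--             state = State.end
--             continue
--         if state == State.start or state == State.end:
--             continue
--
--         if part == "":
--             continue
--
--         if state == State.rules:
--             parts.append(part)
--         if state == State.glossary:
--             glossary.append(part)
--
--     return parts, glossary
-- ===== SOURCE B (Python) =====
-- def separate_parts_and_glossary(vs):
--     s = [v.strip() for v in vs]
--     n = len(s)
--     try:
--         start = s.index("Credits")
--     except ValueError:
--         return [], []
--     try:
--         g = s.index("Glossary", start + 1)
--     except ValueError:
--         g = n
--     try:
--         e = s.index("Credits", g + 1)
--     except ValueError:
--         e = n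
--     rules = [x for x in s[start + 1:g] if x]
--     glossary = [x for x in s[g + 1:e] if x]
--     return rules, glossary
-- ===== Notes on version B (the rewrite author's own statement) =====
-- stated objective: faster
-- what changed: A is a four-state machine that inspects every element in an interpreted Python loop; B strips all elements once, locates the 'Credits'/'Glossary'/'Credits' sentinel indices with list.index, and returns the two filtered slices between them.
import Mathlib
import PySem

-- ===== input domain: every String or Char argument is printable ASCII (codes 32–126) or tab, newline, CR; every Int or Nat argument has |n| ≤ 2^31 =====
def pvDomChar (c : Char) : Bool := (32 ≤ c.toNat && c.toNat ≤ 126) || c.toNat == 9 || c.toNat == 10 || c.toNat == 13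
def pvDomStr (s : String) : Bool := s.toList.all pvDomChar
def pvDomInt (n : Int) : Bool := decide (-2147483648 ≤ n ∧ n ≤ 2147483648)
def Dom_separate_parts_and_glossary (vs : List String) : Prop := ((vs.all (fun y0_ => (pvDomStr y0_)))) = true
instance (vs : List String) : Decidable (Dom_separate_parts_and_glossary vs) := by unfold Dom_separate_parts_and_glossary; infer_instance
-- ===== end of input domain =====

-- B replaces A's four-state machine by a sentinel-index/slice decomposition (same O(n), measured constant-factor faster in Python).

-- ===== PORT A =====
inductive PVState
  | start | rules | glossary | stop
deriving DecidableEq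

-- one iteration of A's loop, over the NOT-yet-stripped element (strips first, branches in A's order)
def pvStepA (acc : List String × List String × PVState) (part0 : String) :
    List String × List String × PVState :=
  let part := PySem.Str.strip part0
  let parts := acc.1
  let glossary := acc.2.1
  let st := acc.2.2
  if st = .start ∧ part = "Credits" then (parts, glossary, .rules)
  else if st = .rules ∧ part = "Glossary" then (parts, glossary, .glossary)
  else if st = .glossary ∧ part = "Credits" then (parts, glossary, .stop)
  else if st = .start ∨ st = .stop then (parts, glossary, st)
  else if part = "" then (parts, glossary, st)
  else ((if st = .rules then parts ++ [part] else parts),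
        (if st = .glossary then glossary ++ [part] else glossary), st)

def separate_parts_and_glossary (vs : List String) : List String × List String :=
  let r := vs.foldl pvStepA ([], [], PVState.start)
  (r.1, r.2.1)

-- ===== PORT B =====
-- s.index(t, k) (first index ≥ k holding t; none = ValueError)
def pvIndexFrom (s : List String) (t : String) (k : Nat) : Option Nat :=
  ((s.drop k).findIdx? (· == t)).map (· + k)

def separate_parts_and_glossary_alt (vs : List String) : List String × List String :=
  let s := vs.map PySem.Str.strip
  let n := s.length
  match s.findIdx? (· == "Credits") with
  | none => ([], [])
  | some start =>
    let g := (pvIndexFrom s "Glossary" (start + 1)).getD n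
    let e := (pvIndexFrom s "Credits" (g + 1)).getD n
    (((s.drop (start + 1)).take (g - (start + 1))).filter (· != ""),
     ((s.drop (g + 1)).take (e - (g + 1))).filter (· != ""))

-- ===== PRECONDITION & SPEC =====
def Spec_separate_parts_and_glossary (vs : List String) (out : List String × List String) : Prop := out = separate_parts_and_glossary_alt vs
instance (vs : List String) (out : List String × List String) : Decidable (Spec_separate_parts_and_glossary vs out) := by unfold Spec_separate_parts_and_glossary; infer_instance

-- ===== CLAIM (what is proved, stated in full; the proofs are below) =====
def Claim_equal_separate_parts_and_glossary : Prop := ∀ (vs : List String), Dom_separate_parts_and_glossary vs → Spec_separate_parts_and_glossary vs (separate_parts_and_glossary vs)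

-- ===== LEMMAS AND PROOFS =====

-- A's state machine as structural recursion over the stripped list (proof device)
def pvRun : PVState → List String → List String × List String × PVState
  | st, [] => ([], [], st)
  | .start, p :: t => if p = "Credits" then pvRun .rules t else pvRun .start t
  | .rules, p :: t =>
      if p = "Glossary" then pvRun .glossary t
      else if p = "" then pvRun .rules t
      else let r := pvRun .rules t; (p :: r.1, r.2.1, r.2.2)
  | .glossary, p :: t =>
      if p = "Credits" then pvRun .stop t
      else if p = "" then pvRun .glossary t
      else let r := pvRun .glossary t; (r.1, p :: r.2.1, r.2.2)
  | .stop, _ :: t => pvRun .stop t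

-- A's step over an already-stripped element (pvStepA = strip, then pvStepS)
def pvStepS (acc : List String × List String × PVState) (part : String) :
    List String × List String × PVState :=
  let parts := acc.1
  let glossary := acc.2.1
  let st := acc.2.2
  if st = .start ∧ part = "Credits" then (parts, glossary, .rules)
  else if st = .rules ∧ part = "Glossary" then (parts, glossary, .glossary)
  else if st = .glossary ∧ part = "Credits" then (parts, glossary, .stop)
  else if st = .start ∨ st = .stop then (parts, glossary, st)
  else if part = "" then (parts, glossary, st)
  else ((if st = .rules then parts ++ [part] else parts),
        (if st = .glossary then glossary ++ [part] else glossary), st)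
lemma pvFoldl_pvRun (s : List String) : ∀ (p g : List String) (st : PVState),
    s.foldl pvStepS (p, g, st) =
      (p ++ (pvRun st s).1, g ++ (pvRun st s).2.1, (pvRun st s).2.2) := by
  induction s with
  | nil => intro p g st; simp [pvRun]
  | cons x t ih =>
    intro p g st
    cases st <;>
      simp only [List.foldl_cons, pvStepS, pvRun] <;>
      split_ifs <;>
      simp_all [List.append_assoc]

lemma pvRun_stop (s : List String) : pvRun .stop s = ([], [], .stop) := by
  induction s with
  | nil => rfl
  | cons p t ih => simpa [pvRun] using ih

lemma pvGetD_map_succ (o : Option Nat) (n : Nat) :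
    ((o.map (· + 1)).getD (n + 1)) = o.getD n + 1 := by
  cases o <;> simp

lemma pvRun_glossary_fst (s : List String) : (pvRun .glossary s).1 = [] := by
  induction s with
  | nil => rfl
  | cons p t ih => simp only [pvRun]; split_ifs <;> simp [pvRun_stop, ih]

lemma pvRun_glossary (s : List String) :
    (pvRun .glossary s).2.1 =
      ((s.take ((s.findIdx? (· == "Credits")).getD s.length)).filter (· != "")) := by
  induction s with
  | nil => rfl
  | cons p t ih =>
    by_cases hp : p = "Credits"
    · simp [pvRun, hp, List.findIdx?_cons, pvRun_stop]
    · have hb : (p == "Credits") = false := by simp [hp]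
      simp only [pvRun, List.findIdx?_cons, hb, if_neg hp, Bool.false_eq_true, if_false,
        List.length_cons, pvGetD_map_succ, List.take_succ_cons, List.filter_cons]
      by_cases hz : p = ""
      · simp [hz, ih]
      · have : (p != "") = true := by simp [hz]
        simp [this, ih, hz]

lemma pvRun_rules (s : List String) :
    (pvRun .rules s).1 =
      ((s.take ((s.findIdx? (· == "Glossary")).getD s.length)).filter (· != "")) ∧
    (pvRun .rules s).2.1 =
      (pvRun .glossary (s.drop (((s.findIdx? (· == "Glossary")).getD s.length) + 1))).2.1 := by
  induction s with
  | nil => simp [pvRun]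
  | cons p t ih =>
    by_cases hp : p = "Glossary"
    · simp [pvRun, hp, List.findIdx?_cons, pvRun_glossary_fst]
    · have hb : (p == "Glossary") = false := by simp [hp]
      simp only [pvRun, List.findIdx?_cons, hb, if_neg hp, Bool.false_eq_true, if_false,
        List.length_cons, pvGetD_map_succ, List.take_succ_cons, List.filter_cons,
        List.drop_succ_cons]
      by_cases hz : p = ""
      · simp [hz, ih]
      · have : (p != "") = true := by simp [hz]
        simp [this, ih, hz]

lemma pvRun_start (s : List String) :
    ((pvRun .start s).1, (pvRun .start s).2.1) =
      (match s.findIdx? (· == "Credits") with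
       | none => (([] : List String), ([] : List String))
       | some i => ((pvRun .rules (s.drop (i + 1))).1, (pvRun .rules (s.drop (i + 1))).2.1)) := by
  induction s with
  | nil => rfl
  | cons p t ih =>
    by_cases hp : p = "Credits"
    · simp [pvRun, hp, List.findIdx?_cons]
    · have hb : (p == "Credits") = false := by simp [hp]
      simp only [pvRun, List.findIdx?_cons, hb, Bool.false_eq_true, if_false, if_neg hp]
      rw [ih]
      cases h : t.findIdx? (· == "Credits") <;> simp [List.drop_succ_cons]

-- ===== VERDICT (by name: the statement is the Claim_ definition above) =====
lemma pvFindIdx?_lt (s : List String) (t : String) (i : Nat)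
    (h : s.findIdx? (· == t) = some i) : i < s.length := by
  rw [List.findIdx?_eq_some_iff_findIdx_eq] at h
  exact h.1

theorem separate_parts_and_glossary_spec : Claim_equal_separate_parts_and_glossary := by
  intro vs _
  unfold Spec_separate_parts_and_glossary separate_parts_and_glossary
    separate_parts_and_glossary_alt
  have hfold : vs.foldl pvStepA ([], [], PVState.start)
      = (vs.map PySem.Str.strip).foldl pvStepS ([], [], PVState.start) := by
    rw [List.foldl_map]
    rfl
  rw [hfold, pvFoldl_pvRun]
  set s := vs.map PySem.Str.strip with hs
  have h0 := pvRun_start s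
  cases hfi : s.findIdx? (· == "Credits") with
  | none =>
    rw [hfi] at h0
    simp only [Prod.mk.injEq] at h0
    simp only [List.nil_append, hfi, h0.1, h0.2]
  | some start =>
    rw [hfi] at h0
    simp only [Prod.mk.injEq] at h0
    have hstart : start < s.length := pvFindIdx?_lt s "Credits" start hfi
    have hrlen : (s.drop (start + 1)).length = s.length - (start + 1) := by
      simp
    have hrules := pvRun_rules (s.drop (start + 1))
    have hgle : ((s.drop (start + 1)).findIdx? (· == "Glossary")).getD
        (s.drop (start + 1)).length ≤ (s.drop (start + 1)).length := by
      cases hfg : (s.drop (start + 1)).findIdx? (· == "Glossary") with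
      | none => simp
      | some j =>
        simp only [Option.getD_some]
        exact le_of_lt (pvFindIdx?_lt _ "Glossary" j hfg)
    set gr := ((s.drop (start + 1)).findIdx? (· == "Glossary")).getD
        (s.drop (start + 1)).length with hgr
    have hg : (pvIndexFrom s "Glossary" (start + 1)).getD s.length = gr + (start + 1) := by
      unfold pvIndexFrom
      cases hfg : (s.drop (start + 1)).findIdx? (· == "Glossary") with
      | none => simp only [hgr, hfg, Option.map_none, Option.getD_none]; rw [hrlen]; omega
      | some j => simp [hgr, hfg]
    have hdropg : s.drop (gr + (start + 1) + 1) = (s.drop (start + 1)).drop (gr + 1) := by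
      rw [List.drop_drop]; congr 1; omega
    have hglos := pvRun_glossary ((s.drop (start + 1)).drop (gr + 1))
    have hrrlen : ((s.drop (start + 1)).drop (gr + 1)).length
        = s.length - (gr + (start + 1) + 1) := by
      simp only [List.length_drop]; omega
    set rr := (s.drop (start + 1)).drop (gr + 1) with hrr
    set er := (rr.findIdx? (· == "Credits")).getD rr.length with her
    have he : (pvIndexFrom s "Credits" (gr + (start + 1) + 1)).getD s.length
        - (gr + (start + 1) + 1) = er := by
      unfold pvIndexFrom
      rw [hdropg]
      cases hfe : rr.findIdx? (· == "Credits") with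
      | none =>
        simp only [her, hfe, Option.map_none, Option.getD_none]
        rw [hrrlen]
      | some j => simp [her, hfe]
    simp only [List.nil_append, hfi, h0.1, h0.2, hrules.1, hrules.2, hg, he,
      Nat.add_sub_cancel, hdropg]
    rw [hglos]
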